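-- pv_equiv track=rewrite | github.com/augustodevjs/logica-para-computacao | projeto/algoritmoDPLL.py | pegarAtomica
-- ===== SOURCE A (Python) =====
-- def pegarAtomica(formulaCNF):
--     # lista vazia para armazenar as variáveis atômicas.
--     listaAtomicas = []
--
--     # percorre cada cláusula na fórmula
--     for clausula in formulaCNF:
--         # percorre cada literal dentro de uma cláusula
--         for literal in clausula:
--             # verifica se o literal é positivo. Se for positivo, significa
--             # que é uma variável atômica, então esse literal é adicionado
--             # à lista
--             if literal > 0:
--                 listaAtomicas.append(literal)
--     # Após o término dos loops, o código executa list(set(listaAtomicas)) != []. Aqui, set(listaAtomicas) cria um conjunto dos elementos em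
--     # listaAtomicas, removendo quaisquer duplicatas. Em seguida, list(...)
--     # converte o conjunto de volta em uma lista. O código verifica se essa
--     # lista não é vazia
--     if list(set(listaAtomicas)) != []:
--         # retorna a última variável atômica encontrada na fórmula CNF.
--         return listaAtomicas.pop()
-- ===== SOURCE B (Python) =====
-- def pegarAtomica(formulaCNF):
--     # Scan from the end with early return: the last positive literal in
--     # reading order is the first one found when traversing clauses and
--     # literals in reverse.
--     for clausula in reversed(formulaCNF):
--         for literal in reversed(clausula):
--             if literal > 0:
--                 return literal
--     return None
-- ===== Notes on version B (the rewrite author's own statement) =====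
-- stated objective: simpler
-- what changed: Replaces the full accumulation of all positive literals (plus a set-based emptiness test and a pop) by a direct reverse scan that early-returns the first positive literal found from the end.
import Mathlib
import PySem

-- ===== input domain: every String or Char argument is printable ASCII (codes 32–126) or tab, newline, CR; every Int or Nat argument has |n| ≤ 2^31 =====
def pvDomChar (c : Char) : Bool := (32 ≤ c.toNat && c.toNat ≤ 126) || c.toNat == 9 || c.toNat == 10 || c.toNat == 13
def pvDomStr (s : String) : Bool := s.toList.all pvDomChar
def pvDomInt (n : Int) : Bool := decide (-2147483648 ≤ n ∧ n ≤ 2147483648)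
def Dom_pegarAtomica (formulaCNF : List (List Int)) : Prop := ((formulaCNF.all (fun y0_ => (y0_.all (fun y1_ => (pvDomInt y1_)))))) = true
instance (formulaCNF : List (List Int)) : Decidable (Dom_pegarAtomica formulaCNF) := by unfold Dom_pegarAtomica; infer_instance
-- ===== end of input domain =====

-- B replaces A's full accumulation of positive literals (plus set test and pop) by a
-- direct reverse scan with early return; objective: simpler, same result.

-- ===== PORT A =====
-- A accumulates every positive literal, then, if list(set(...)) is nonempty, pops
-- (returns) the LAST element; falling off the end returns None.
def pegarAtomica (formulaCNF : List (List Int)) : Option Int :=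
  let listaAtomicas :=
    formulaCNF.foldl
      (fun acc clausula =>
        clausula.foldl (fun acc2 literal => if literal > 0 then acc2 ++ [literal] else acc2) acc)
      []
  if (PySem.Set.ofList listaAtomicas) ≠ [] then
    -- pop() on a nonempty list returns its last element
    listaAtomicas.getLast?
  else none

-- ===== PORT B =====
-- B: scan clauses from the end, literals from the end, early-return the first positive.
def pegarAtomicaScanClause : List Int → Option Int
  | [] => none
  | literal :: rest => if literal > 0 then some literal else pegarAtomicaScanClause rest

def pegarAtomicaScan : List (List Int) → Option Int
  | [] => none
  | clausula :: rest =>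
    match pegarAtomicaScanClause clausula.reverse with
    | some l => some l
    | none => pegarAtomicaScan rest

def pegarAtomica_alt (formulaCNF : List (List Int)) : Option Int :=
  pegarAtomicaScan formulaCNF.reverse

-- ===== PRECONDITION & SPEC =====
def Spec_pegarAtomica (formulaCNF : List (List Int)) (out : Option Int) : Prop := out = pegarAtomica_alt formulaCNF
instance (formulaCNF : List (List Int)) (out : Option Int) : Decidable (Spec_pegarAtomica formulaCNF out) := by unfold Spec_pegarAtomica; infer_instance

-- ===== CLAIM (what is proved, stated in full; the proofs are below) =====
def Claim_equal_pegarAtomica : Prop := ∀ (formulaCNF : List (List Int)), Dom_pegarAtomica formulaCNF → Spec_pegarAtomica formulaCNF (pegarAtomica formulaCNF)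

-- ===== LEMMAS AND PROOFS =====

-- the list of positive literals in reading order
def pvPos (formulaCNF : List (List Int)) : List Int :=
  formulaCNF.flatMap (fun c => c.filter (fun l => decide (l > 0)))

theorem pv_inner (c : List Int) (acc : List Int) :
    c.foldl (fun acc2 literal => if literal > 0 then acc2 ++ [literal] else acc2) acc
      = acc ++ c.filter (fun l => decide (l > 0)) := by
  induction c generalizing acc with
  | nil => simp
  | cons x xs ih =>
    simp only [List.foldl_cons, List.filter_cons]
    by_cases h : x > 0 <;> simp [h, ih]

theorem pv_outer (f : List (List Int)) (acc : List Int) :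
    f.foldl
      (fun acc clausula =>
        clausula.foldl (fun acc2 literal => if literal > 0 then acc2 ++ [literal] else acc2) acc)
      acc = acc ++ pvPos f := by
  induction f generalizing acc with
  | nil => simp [pvPos]
  | cons c cs ih =>
    rw [List.foldl_cons, pv_inner, ih]
    simp [pvPos, List.append_assoc]

theorem pv_A (f : List (List Int)) : pegarAtomica f = (pvPos f).getLast? := by
  unfold pegarAtomica
  simp only [pv_outer, List.nil_append]
  rcases h : pvPos f with _ | ⟨x, xs⟩
  · simp
  · have hx : x ∈ PySem.Set.ofList (x :: xs) := by
      rw [PySem.Set.mem_ofList]; exact List.mem_cons_self ..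
    have : PySem.Set.ofList (x :: xs) ≠ [] := by
      intro he; rw [he] at hx; exact (List.not_mem_nil) hx
    simp [this]

theorem pv_scanClause (r : List Int) :
    pegarAtomicaScanClause r = (r.filter (fun l => decide (l > 0))).head? := by
  induction r with
  | nil => rfl
  | cons x xs ih =>
    simp only [pegarAtomicaScanClause, List.filter_cons]
    by_cases h : x > 0 <;> simp [h, ih]

theorem pv_scan (cs : List (List Int)) :
    pegarAtomicaScan cs = (cs.flatMap (fun c => (c.filter (fun l => decide (l > 0))).reverse)).head? := by
  induction cs with
  | nil => rfl
  | cons c rest ih =>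
    simp only [pegarAtomicaScan, pv_scanClause, List.filter_reverse, List.flatMap_cons,
      List.head?_append]
    rcases h : ((c.filter (fun l => decide (l > 0))).reverse).head? with _ | x <;>
      simp [ih]

theorem pv_B (f : List (List Int)) : pegarAtomica_alt f = (pvPos f).getLast? := by
  unfold pegarAtomica_alt
  rw [pv_scan]
  have : (f.reverse.flatMap (fun c => (c.filter (fun l => decide (l > 0))).reverse))
      = (pvPos f).reverse := by
    simp only [pvPos, List.reverse_flatMap]
    rfl
  rw [this, List.head?_reverse]

-- ===== VERDICT (by name: the statement is the Claim_ definition above) =====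
theorem pegarAtomica_spec : Claim_equal_pegarAtomica := by
  intro f _
  unfold Spec_pegarAtomica
  rw [pv_A, pv_B]
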